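-- pv_equiv track=rewrite | github.com/mArcinUci/Code_Wars_tryouts | maximize_points.py | maximize_points
-- ===== SOURCE A (Python) =====
-- def maximize_points(team1, team2):
--     count = 0
--     count_possibilities = []
--     team1.sort()
--     team2.sort()
--
--     for i in range(len(team1)):
--         team1.append(team1.pop(team1.index(team1[0])))
--         power_poind_difference = [x1 - x2 for (x1, x2) in zip(team1,team2)]
--         for i in power_poind_difference:
--             if i > 0:
--                 count +=1
--         count_possibilities.append(count)
--         count = 0
--     return max(count_possibilities)
-- ===== SOURCE B (Python) =====
-- def maximize_points(team1, team2):
--     # Sort in place (same observable mutation as the original up to its final state).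
--     team1.sort()
--     team2.sort()
--     n = len(team1)
--     L = min(n, len(team2))
--     # diff[s] (s in 0..n-1) will hold, after the prefix-sum scan, the number of
--     # indices i < L with team1[(i+s) % n] > team2[i]  (the win count at shift s).
--     diff = [0] * (n + 1)
--     j = 0  # two-pointer: number of elements of team1 that are <= team2[i]
--     for i in range(L):
--         x = team2[i]
--         while j < n and team1[j] <= x:
--             j += 1
--         lo = j  # team1[k] > x  iff  k >= lo
--         if lo == n:
--             continue
--         start = (lo - i) % n
--         end = start + (n - lo)
--         diff[start] += 1
--         if end <= n:
--             diff[end] -= 1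
--         else:
--             diff[0] += 1
--             diff[end - n] -= 1
--     best = -1
--     cur = 0
--     for s in range(n):
--         cur += diff[s]
--         if cur > best:
--             best = cur
--     return best
-- ===== Notes on version B (the rewrite author's own statement) =====
-- stated objective: faster
-- what changed: Instead of materialising every cyclic rotation of the sorted team1 and re-scanning it (O(n^2)), B sorts once, uses a two-pointer over the two sorted lists to find, for each i, the threshold index lo_i with team1[k] > team2[i] iff k >= lo_i, turns each i into a cyclic interval of winning shifts, accumulates them in a difference array over shifts, and takes the max of its prefix sums.
import Mathlib
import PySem

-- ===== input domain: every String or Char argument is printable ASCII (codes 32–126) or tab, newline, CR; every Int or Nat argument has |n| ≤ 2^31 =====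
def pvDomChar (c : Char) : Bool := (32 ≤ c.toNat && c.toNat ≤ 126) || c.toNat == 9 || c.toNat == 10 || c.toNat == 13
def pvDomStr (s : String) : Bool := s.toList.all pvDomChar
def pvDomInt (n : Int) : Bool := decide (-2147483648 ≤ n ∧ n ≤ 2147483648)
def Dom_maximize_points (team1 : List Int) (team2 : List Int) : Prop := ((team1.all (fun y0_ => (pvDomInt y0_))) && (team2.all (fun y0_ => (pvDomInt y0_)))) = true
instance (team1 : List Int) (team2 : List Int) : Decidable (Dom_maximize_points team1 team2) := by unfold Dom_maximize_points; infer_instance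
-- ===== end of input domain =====

-- B replaces A's quadratic rotate-and-rescan with a two-pointer threshold scan plus a cyclic
-- difference array over shift values (objective: faster). Both A and B sort team1 and team2 in
-- place; the equivalence proved here is about the return value.

-- ===== PORT A =====
-- one step of  team1.append(team1.pop(team1.index(team1[0])))
def pvRotStep (t1 : List Int) : List Int :=
  match PySem.List.pyGet? t1 0 with
  | none => t1
  | some h =>
    match PySem.List.index? t1 h with
    | none => t1
    | some i =>
      match PySem.List.pop? t1 (i : Int) with
      | none => t1
      | some (v, rest) => rest ++ [v]

-- one iteration of A's outer loop: rotate, count positive differences, append the count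
def pvAStep (t2 : List Int) (st : List Int × List Int) (_ : Nat) : List Int × List Int :=
  let cur := pvRotStep st.1
  let diffs := (cur.zip t2).map (fun p => p.1 - p.2)
  let count := diffs.foldl (fun c d => if d > 0 then c + 1 else c) (0 : Int)
  (cur, st.2 ++ [count])

def maximize_points (team1 : List Int) (team2 : List Int) : Int :=
  let t1 := PySem.List.sorted team1 (fun x => x) false
  let t2 := PySem.List.sorted team2 (fun x => x) false
  let st := (List.range t1.length).foldl (pvAStep t2) (t1, [])
  match PySem.List.max? st.2 (fun x => x) with
  | some m => m
  | none => 0   -- unreachable under Pre_ (Python raises ValueError on empty team1)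

-- ===== PORT B =====
-- while j < n and team1[j] <= x: j += 1   (fuel n - j is enough: j only grows)
def pvAdvance (t1 : List Int) (x : Int) : Nat → Nat → Nat
  | j, 0 => j
  | j, fuel+1 =>
    if j < t1.length then
      (if t1.getD j 0 ≤ x then pvAdvance t1 x (j+1) fuel else j)
    else j

-- the difference-array update for one index i with threshold lo (< n)
def pvUpdate (d : List Int) (n i lo : Nat) : List Int :=
  let start := (PySem.Int.mod ((lo : Int) - (i : Int)) (n : Int)).toNat
  let e := start + (n - lo)
  let d1 := d.set start (d.getD start 0 + 1)
  if e ≤ n then d1.set e (d1.getD e 0 - 1)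
  else
    let d' := d1.set 0 (d1.getD 0 0 + 1)
    d'.set (e - n) (d'.getD (e - n) 0 - 1)

-- one iteration of B's first loop (state: the two-pointer j and the difference array)
def pvBStep (t1 t2 : List Int) (st : Nat × List Int) (i : Nat) : Nat × List Int :=
  let x := t2.getD i 0
  let lo := pvAdvance t1 x st.1 (t1.length - st.1)
  if lo = t1.length then (lo, st.2)
  else (lo, pvUpdate st.2 t1.length i lo)

-- one iteration of B's prefix-sum/maximum scan (state: running sum, best)
def pvScanStep (d : List Int) (p : Int × Int) (s : Nat) : Int × Int :=
  let cur := p.1 + d.getD s 0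
  (cur, if cur > p.2 then cur else p.2)

def maximize_points_alt (team1 : List Int) (team2 : List Int) : Int :=
  let t1 := PySem.List.sorted team1 (fun x => x) false
  let t2 := PySem.List.sorted team2 (fun x => x) false
  let n := t1.length
  let L := min n t2.length
  let st := (List.range L).foldl (pvBStep t1 t2) (0, List.replicate (n+1) (0 : Int))
  ((List.range n).foldl (pvScanStep st.2) (0, -1)).2

-- ===== PRECONDITION & SPEC =====
-- Pre_ excludes only team1 = [], on which Python A raises ValueError (max of an empty list).
def Pre_maximize_points (team1 : List Int) (team2 : List Int) : Prop := team1 ≠ []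
instance (team1 : List Int) (team2 : List Int) : Decidable (Pre_maximize_points team1 team2) := by
  unfold Pre_maximize_points; infer_instance

def pvWitness_maximize_points : List Int × List Int := ([1, 3, 2], [2, 2])

def Spec_maximize_points (team1 : List Int) (team2 : List Int) (out : Int) : Prop :=
  out = maximize_points_alt team1 team2
instance (team1 : List Int) (team2 : List Int) (out : Int) :
    Decidable (Spec_maximize_points team1 team2 out) := by
  unfold Spec_maximize_points; infer_instance

-- ===== CLAIM (what is proved, stated in full; the proofs are below) =====
def Claim_equal_maximize_points : Prop := ∀ (team1 : List Int) (team2 : List Int), Dom_maximize_points team1 team2 → Pre_maximize_points team1 team2 → Spec_maximize_points team1 team2 (maximize_points team1 team2)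

-- ===== LEMMAS AND PROOFS =====

-- number of elements of t1 that are ≤ x; on sorted t1, t1[k] > x iff pvCnt ≤ k
def pvCnt (t1 : List Int) (x : Int) : Nat := t1.countP (fun a => decide (a ≤ x))

-- the win count at cyclic shift s (the common specification of both programs)
def pvC (t1 t2 : List Int) (s : Nat) : Nat :=
  (List.range (min t1.length t2.length)).countP
    (fun i => decide (pvCnt t1 (t2.getD i 0) ≤ (i + s) % t1.length))

-- t1[s:] ++ t1[:s], the list A carries after s rotation steps
def pvRot (l : List Int) (k : Nat) : List Int := l.drop k ++ l.take k

-- the prefix sum of the difference array up to and including position s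
def pvPsum (d : List Int) (s : Nat) : Int := (d.take (s+1)).sum

theorem pvCnt_iff (l : List Int) (hl : l.Pairwise (· ≤ ·)) (x : Int) :
    ∀ k, k < l.length → (l.getD k 0 ≤ x ↔ k < pvCnt l x) := by
  induction l with
  | nil => intro k hk; simp at hk
  | cons a rest ih =>
    rcases List.pairwise_cons.mp hl with ⟨ha, hrest⟩
    intro k hk
    cases k with
    | zero =>
      simp only [List.getD, pvCnt, List.countP_cons]
      by_cases h : a ≤ x
      · simp [h]
      · have : rest.countP (fun a => decide (a ≤ x)) = 0 := by
          rw [List.countP_eq_zero]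
          intro b hb
          simp only [decide_eq_true_eq]
          intro hbx
          exact h (le_trans (ha b hb) hbx)
        simp [h, this]
    | succ k =>
      have hk' : k < rest.length := by simpa using hk
      have := ih hrest k hk'
      simp only [pvCnt, List.countP_cons] at this ⊢
      by_cases h : a ≤ x
      · simpa [h, Nat.lt_succ_iff, Nat.succ_lt_succ_iff] using this
      · have hz : rest.countP (fun a => decide (a ≤ x)) = 0 := by
          rw [List.countP_eq_zero]
          intro b hb
          simp only [decide_eq_true_eq]
          intro hbx
          exact h (le_trans (ha b hb) hbx)
        simp [h, hz] at this ⊢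
        exact this

theorem pvCnt_le_length (l : List Int) (x : Int) : pvCnt l x ≤ l.length :=
  List.countP_le_length

theorem pvRotStep_cons (a : Int) (l : List Int) : pvRotStep (a :: l) = l ++ [a] := by
  have h0 : PySem.List.pyGet? (a :: l) 0 = some a := by
    simp [PySem.List.pyGet?, PySem.List.pyIdx?]
  have h1 : PySem.List.index? (a :: l) a = some 0 := PySem.List.index?_cons_self a l
  have h2 : PySem.List.pop? (a :: l) ((0 : Nat) : Int) = some (a, l) :=
    PySem.List.pop?_zero_cons a l
  simp only [pvRotStep, h0, h1, h2]

theorem length_pvRot (l : List Int) (k : Nat) : (pvRot l k).length = l.length := by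
  simp [pvRot]; omega

theorem pvRot_zero (l : List Int) : pvRot l 0 = l := by simp [pvRot]

theorem pvRot_succ (l : List Int) (k : Nat) (hk : k < l.length) :
    pvRotStep (pvRot l k) = pvRot l (k+1) := by
  have hdrop : l.drop k = l[k] :: l.drop (k+1) := List.drop_eq_getElem_cons hk
  have htake : l.take (k+1) = l.take k ++ [l[k]] := by
    rw [List.take_add_one]; simp [hk]
  rw [pvRot, hdrop]
  simp only [List.cons_append, pvRotStep_cons]
  rw [pvRot, htake]
  simp

theorem getD_pvRot (l : List Int) (k i : Nat) (hk : k ≤ l.length) (hi : i < l.length) :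
    (pvRot l k).getD i 0 = l.getD ((i + k) % l.length) 0 := by
  have hn : 0 < l.length := by omega
  by_cases h : i < l.length - k
  · have h1 : (i + k) % l.length = i + k := Nat.mod_eq_of_lt (by omega)
    rw [h1, pvRot]
    rw [List.getD_append _ _ _ _ (by simp; omega)]
    rw [List.getD_eq_getElem _ _ (by simp; omega), List.getD_eq_getElem _ _ (by omega)]
    rw [List.getElem_drop]
    congr 1; omega
  · have h1 : (i + k) % l.length = i + k - l.length := by
      rw [Nat.mod_eq_sub_mod (by omega), Nat.mod_eq_of_lt (by omega)]
    rw [h1, pvRot]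
    rw [List.getD_append_right _ _ _ _ (by simp; omega)]
    rw [List.getD_eq_getElem _ _ (by simp; omega), List.getD_eq_getElem _ _ (by omega)]
    rw [List.getElem_take]
    congr 1; simp only [List.length_drop]; omega

theorem pvZip_eq_map_range (u v : List Int) :
    u.zip v = (List.range (min u.length v.length)).map (fun i => (u.getD i 0, v.getD i 0)) := by
  induction u generalizing v with
  | nil => simp
  | cons a u' ih =>
    cases v with
    | nil => simp
    | cons b v' =>
      simp only [List.zip_cons_cons, List.length_cons, Nat.succ_min_succ, List.range_succ_eq_map,
        List.map_cons, List.map_map]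
      rw [ih v']
      refine congrArg₂ List.cons (by simp) ?_
      apply List.map_congr_left
      intro i hi
      simp

theorem pvPsum_set (d : List Int) : ∀ (k s : Nat) (c : Int), k < d.length →
    pvPsum (d.set k (d.getD k 0 + c)) s = pvPsum d s + if k ≤ s then c else 0 := by
  induction d with
  | nil => intro k s c hk; simp at hk
  | cons a d' ih =>
    intro k s c hk
    cases k with
    | zero =>
      simp only [List.set_cons_zero, List.getD_cons_zero, pvPsum, List.take_succ_cons,
        List.sum_cons, Nat.zero_le, if_true]
      ring
    | succ k =>
      have hk' : k < d'.length := by simpa using hk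
      simp only [List.set_cons_succ, List.getD_cons_succ]
      cases s with
      | zero =>
        simp [pvPsum]
      | succ s =>
        simp only [pvPsum, List.take_succ_cons, List.sum_cons] at *
        rw [ih k s c hk']
        rw [if_congr (by omega : (k + 1 ≤ s + 1) ↔ (k ≤ s)) rfl rfl]
        ring

theorem pvAdvance_eq (t1 : List Int) (hs : t1.Pairwise (· ≤ ·)) (x : Int) :
    ∀ (fuel j : Nat), j ≤ pvCnt t1 x → pvCnt t1 x ≤ j + fuel →
      pvAdvance t1 x j fuel = pvCnt t1 x := by
  intro fuel
  induction fuel with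
  | zero => intro j h1 h2; simp only [pvAdvance]; omega
  | succ fuel ih =>
    intro j h1 h2
    by_cases hj : j < t1.length
    · simp only [pvAdvance, if_pos hj]
      by_cases hx : t1.getD j 0 ≤ x
      · have hlt : j < pvCnt t1 x := (pvCnt_iff t1 hs x j hj).mp hx
        rw [if_pos hx]
        exact ih (j+1) hlt (by omega)
      · have : ¬ j < pvCnt t1 x := fun h => hx ((pvCnt_iff t1 hs x j hj).mpr h)
        rw [if_neg hx]; omega
    · have := pvCnt_le_length t1 x
      simp only [pvAdvance, if_neg hj]; omega

theorem pvStart_eq (lo i n : Nat) (hi : i < n) (hlo : lo < n) :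
    (PySem.Int.mod ((lo : Int) - (i : Int)) (n : Int)).toNat =
      (if i ≤ lo then lo - i else lo + n - i) := by
  have hn : (0 : Int) < (n : Int) := by exact_mod_cast Nat.pos_of_ne_zero (by omega)
  rw [PySem.Int.mod_eq_emod_of_pos hn]
  by_cases h : i ≤ lo
  · rw [Int.emod_eq_of_lt (by omega) (by omega), if_pos h]
    omega
  · have he : ((lo : Int) - i) % n = ((lo : Int) - i + n * 1) % n := by
      rw [Int.add_mul_emod_self_left]
    rw [he, Int.emod_eq_of_lt (by omega) (by omega), if_neg h]
    omega

theorem pvNatMod (i s n : Nat) (hi : i < n) (hs : s < n) :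
    (i + s) % n = if i + s < n then i + s else i + s - n := by
  split_ifs with h
  · exact Nat.mod_eq_of_lt h
  · rw [Nat.mod_eq_sub_mod (by omega), Nat.mod_eq_of_lt (by omega)]

theorem length_pvUpdate (d : List Int) (n i lo : Nat) :
    (pvUpdate d n i lo).length = d.length := by
  unfold pvUpdate
  dsimp only
  split_ifs <;> simp

theorem pvUpdate_psum (d : List Int) (n i lo s : Nat) (hd : d.length = n + 1)
    (hi : i < n) (hlo : lo < n) (hs : s < n) :
    pvPsum (pvUpdate d n i lo) s = pvPsum d s + (if lo ≤ (i + s) % n then 1 else 0) := by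
  unfold pvUpdate
  dsimp only
  rw [pvStart_eq lo i n hi hlo, pvNatMod i s n hi hs]
  by_cases hio : i ≤ lo
  · rw [if_pos hio]
    by_cases hen : lo - i + (n - lo) ≤ n
    · rw [if_pos hen, sub_eq_add_neg,
        pvPsum_set _ _ s (-1) (by simp; omega),
        pvPsum_set _ _ s 1 (by omega)]
      split_ifs <;> omega
    · rw [if_neg hen, sub_eq_add_neg,
        pvPsum_set _ _ s (-1) (by simp; omega),
        pvPsum_set _ _ s 1 (by simp; omega),
        pvPsum_set _ _ s 1 (by omega)]
      split_ifs <;> omega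
  · rw [if_neg hio]
    by_cases hen : lo + n - i + (n - lo) ≤ n
    · rw [if_pos hen, sub_eq_add_neg,
        pvPsum_set _ _ s (-1) (by simp; omega),
        pvPsum_set _ _ s 1 (by omega)]
      split_ifs <;> omega
    · rw [if_neg hen, sub_eq_add_neg,
        pvPsum_set _ _ s (-1) (by simp; omega),
        pvPsum_set _ _ s 1 (by simp; omega),
        pvPsum_set _ _ s 1 (by omega)]
      split_ifs <;> omega

theorem pvCnt_mono (l : List Int) (x y : Int) (h : x ≤ y) : pvCnt l x ≤ pvCnt l y := by
  apply List.countP_mono_left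
  intro a _
  simp only [decide_eq_true_eq]
  omega

theorem pvC_mod (t1 t2 : List Int) (s : Nat) :
    pvC t1 t2 (s % t1.length) = pvC t1 t2 s := by
  unfold pvC
  apply List.countP_congr
  intro i _
  rw [Nat.add_mod_mod]

theorem pvA_count (t1 t2 : List Int) (ht1 : t1.Pairwise (· ≤ ·)) (hn : 0 < t1.length)
    (k : Nat) (hk : k ≤ t1.length) :
    (((pvRot t1 k).zip t2).map (fun p => p.1 - p.2)).foldl
        (fun c d => if d > 0 then c + 1 else c) (0 : Int) = (pvC t1 t2 k : Int) := by
  rw [PySem.List.foldl_ite_add_one]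
  rw [List.countP_map, pvZip_eq_map_range, List.countP_map, length_pvRot]
  rw [pvC, zero_add]
  norm_cast
  apply List.countP_congr
  intro i hi
  have hiL : i < min t1.length t2.length := List.mem_range.mp hi
  have hin : i < t1.length := by omega
  have hmod : (i + k) % t1.length < t1.length := Nat.mod_lt _ hn
  simp only [Function.comp_apply]
  simp only [decide_eq_true_eq]
  rw [getD_pvRot t1 k i hk hin]
  have := pvCnt_iff t1 ht1 (t2.getD i 0) ((i + k) % t1.length) hmod
  constructor
  · intro hgt
    by_contra hc
    exact absurd (this.mpr (by omega)) (by omega)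
  · intro hle
    have : ¬ (t1.getD ((i + k) % t1.length) 0 ≤ t2.getD i 0) := fun hx => by
      have := this.mp hx; omega
    omega

theorem pvA_loop (t1 t2 : List Int) (ht1 : t1.Pairwise (· ≤ ·)) (hn : 0 < t1.length) :
    ∀ k, k ≤ t1.length →
      (List.range k).foldl (pvAStep t2) (t1, []) =
        (pvRot t1 k, (List.range k).map (fun j => (pvC t1 t2 (j+1) : Int))) := by
  intro k
  induction k with
  | zero => intro _; simp [pvRot_zero]
  | succ k ih =>
    intro hk
    rw [List.range_succ, List.foldl_append, ih (by omega), List.foldl_cons, List.foldl_nil]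
    unfold pvAStep
    dsimp only
    rw [pvRot_succ t1 k (by omega), pvA_count t1 t2 ht1 hn (k+1) (by omega)]
    rw [List.map_append]
    simp

theorem pvB_loop (t1 t2 : List Int) (ht1 : t1.Pairwise (· ≤ ·)) (ht2 : t2.Pairwise (· ≤ ·)) :
    ∀ k, k ≤ min t1.length t2.length →
      ((List.range k).foldl (pvBStep t1 t2) (0, List.replicate (t1.length+1) (0:Int))).1
          = (if k = 0 then 0 else pvCnt t1 (t2.getD (k-1) 0)) ∧
      ((List.range k).foldl (pvBStep t1 t2) (0, List.replicate (t1.length+1) (0:Int))).2.length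
          = t1.length + 1 ∧
      (∀ s, s < t1.length →
        pvPsum ((List.range k).foldl (pvBStep t1 t2) (0, List.replicate (t1.length+1) (0:Int))).2 s
          = ((List.range k).countP
              (fun i => decide (pvCnt t1 (t2.getD i 0) ≤ (i + s) % t1.length)) : Int)) := by
  intro k
  induction k with
  | zero =>
    intro _
    refine ⟨rfl, by simp, ?_⟩
    intro s _
    simp [pvPsum, List.take_replicate]
  | succ k ih =>
    intro hk
    obtain ⟨ih1, ih2, ih3⟩ := ih (by omega)
    rw [List.range_succ, List.foldl_append, List.foldl_cons, List.foldl_nil]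
    set st := (List.range k).foldl (pvBStep t1 t2) (0, List.replicate (t1.length+1) (0:Int)) with hst
    have hkt2 : k < t2.length := by omega
    have hkn : k < t1.length := by omega
    -- the two-pointer lands exactly on the threshold count
    have hj_le : st.1 ≤ pvCnt t1 (t2.getD k 0) := by
      rw [ih1]
      split_ifs with h0
      · omega
      · apply pvCnt_mono
        rw [List.getD_eq_getElem _ _ (by omega), List.getD_eq_getElem _ _ (by omega)]
        exact List.pairwise_iff_getElem.mp ht2 (k-1) k (by omega) (by omega) (by omega)
    have hj_top : st.1 ≤ t1.length := by
      rw [ih1]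
      split_ifs
      · omega
      · exact pvCnt_le_length _ _
    have hadv : pvAdvance t1 (t2.getD k 0) st.1 (t1.length - st.1) = pvCnt t1 (t2.getD k 0) := by
      apply pvAdvance_eq t1 ht1 _ _ _ hj_le
      have := pvCnt_le_length t1 (t2.getD k 0)
      omega
    unfold pvBStep
    dsimp only
    rw [hadv]
    by_cases hfull : pvCnt t1 (t2.getD k 0) = t1.length
    · rw [if_pos hfull]
      refine ⟨by simp, ih2, ?_⟩
      intro s hs
      rw [ih3 s hs, List.countP_append]
      have hnp : ¬ (pvCnt t1 (t2.getD k 0) ≤ (k + s) % t1.length) := by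
        have := Nat.mod_lt (k + s) (by omega : 0 < t1.length)
        omega
      have hd : (decide (pvCnt t1 (t2.getD k 0) ≤ (k + s) % t1.length)) = false :=
        decide_eq_false hnp
      rw [List.countP_cons, List.countP_nil, hd]
      simp
    · rw [if_neg hfull]
      have hlo : pvCnt t1 (t2.getD k 0) < t1.length := by
        have := pvCnt_le_length t1 (t2.getD k 0)
        omega
      refine ⟨by simp, by rw [length_pvUpdate]; exact ih2, ?_⟩
      intro s hs
      rw [pvUpdate_psum st.2 t1.length k _ s ih2 hkn hlo hs, ih3 s hs]
      rw [List.countP_append, List.countP_cons, List.countP_nil]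
      by_cases hp : pvCnt t1 (t2.getD k 0) ≤ (k + s) % t1.length
      · rw [if_pos hp, decide_eq_true hp]
        push_cast
        simp
      · rw [if_neg hp, decide_eq_false hp]
        push_cast
        simp

theorem pvScan_loop (d : List Int) :
    ∀ k, k ≤ d.length →
      (List.range k).foldl (pvScanStep d) (0, -1) =
        ((d.take k).sum, ((List.range k).map (fun s => pvPsum d s)).foldl max (-1)) := by
  intro k
  induction k with
  | zero => intro _; simp
  | succ k ih =>
    intro hk
    rw [List.range_succ, List.foldl_append, ih (by omega), List.foldl_cons, List.foldl_nil]
    unfold pvScanStep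
    dsimp only
    have hsum : (d.take k).sum + d.getD k 0 = (d.take (k+1)).sum := by
      rw [List.getD_eq_getElem _ _ (by omega)]
      rw [List.sum_take_succ _ _ (by omega)]
    rw [List.map_append, List.foldl_append]
    simp only [List.map_cons, List.map_nil, List.foldl_cons, List.foldl_nil]
    refine congrArg₂ Prod.mk hsum ?_
    have hps : pvPsum d k = (d.take (k+1)).sum := rfl
    rw [hps, ← hsum]
    by_cases h : (d.take k).sum + d.getD k 0 ≤
        ((List.range k).map (fun s => pvPsum d s)).foldl max (-1)
    · rw [if_neg (by omega), max_eq_left h]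
    · rw [if_pos (by omega), max_eq_right (by omega)]

theorem pvMax_eq (n : Nat) (hn : 0 < n) (f : Nat → Nat) (hper : f n = f 0) (m : Int)
    (hm : PySem.List.max? ((List.range n).map (fun j => (f (j+1) : Int))) (fun x => x) = some m) :
    m = ((List.range n).map (fun s => (f s : Int))).foldl max (-1) := by
  have hmem := PySem.List.max?_mem hm
  have hmax := PySem.List.max?_isMax hm
  set best := ((List.range n).map (fun s => (f s : Int))).foldl max (-1) with hbest
  have hval : ∀ y ∈ (List.range n).map (fun s => (f s : Int)), y ≤ best :=
    (PySem.List.le_foldl_max _ _).2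
  have h1 : m ≤ best := by
    obtain ⟨j, hj, hjm⟩ := List.mem_map.mp hmem
    have hjn : j < n := List.mem_range.mp hj
    by_cases hje : j + 1 = n
    · have : m = (f 0 : Int) := by rw [← hjm, hje, hper]
      exact this ▸ hval _ (List.mem_map.mpr ⟨0, List.mem_range.mpr hn, rfl⟩)
    · exact hjm ▸ hval _ (List.mem_map.mpr ⟨j+1, List.mem_range.mpr (by omega), rfl⟩)
  have h2 : best ≤ m := by
    rcases PySem.List.foldl_max_mem ((List.range n).map (fun s => (f s : Int))) (-1) with h | h
    · obtain ⟨j, hj, hjm⟩ := List.mem_map.mp hmem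
      have h0m : (0 : Int) ≤ m := hjm ▸ Int.natCast_nonneg _
      rw [hbest, h]; omega
    · obtain ⟨s, hs, hsm⟩ := List.mem_map.mp h
      have hsn : s < n := List.mem_range.mp hs
      have hbm : best = (f s : Int) := by rw [hbest, ← hsm]
      rcases Nat.eq_zero_or_pos s with h0 | hpos
      · rw [hbm, h0, ← hper]
        have := hmax _ (List.mem_map.mpr ⟨n-1, List.mem_range.mpr (by omega), rfl⟩)
        simpa [Nat.sub_add_cancel hn] using this
      · rw [hbm]
        have := hmax _ (List.mem_map.mpr ⟨s-1, List.mem_range.mpr (by omega), rfl⟩)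
        simpa [Nat.sub_add_cancel hpos] using this
  omega

-- ===== VERDICT (by name: the statement is the Claim_ definition above) =====
theorem maximize_points_spec : Claim_equal_maximize_points := by
  intro team1 team2 _ hpre
  unfold Spec_maximize_points maximize_points maximize_points_alt
  dsimp only
  set t1 := PySem.List.sorted team1 (fun x => x) false with ht1def
  set t2 := PySem.List.sorted team2 (fun x => x) false with ht2def
  have ht1 : t1.Pairwise (· ≤ ·) := by
    have := PySem.List.sorted_pairwise team1 (fun x => x)
    simpa using this
  have ht2 : t2.Pairwise (· ≤ ·) := by
    have := PySem.List.sorted_pairwise team2 (fun x => x)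
    simpa using this
  have hn : 0 < t1.length := by
    rw [ht1def, PySem.List.length_sorted]
    cases team1 with
    | nil => exact absurd rfl hpre
    | cons a l => simp
  obtain ⟨b1, b2, b3⟩ := pvB_loop t1 t2 ht1 ht2 (min t1.length t2.length) le_rfl
  rw [pvA_loop t1 t2 ht1 hn t1.length le_rfl,
      pvScan_loop _ t1.length (by rw [b2]; omega)]
  dsimp only
  have hmapC :
      (List.range t1.length).map
          (fun s => pvPsum ((List.range (min t1.length t2.length)).foldl (pvBStep t1 t2)
              (0, List.replicate (t1.length+1) (0:Int))).2 s) =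
        (List.range t1.length).map (fun s => (pvC t1 t2 s : Int)) := by
    apply List.map_congr_left
    intro s hs
    rw [b3 s (List.mem_range.mp hs)]
    rfl
  rw [hmapC]
  have hper : pvC t1 t2 t1.length = pvC t1 t2 0 := by
    have := pvC_mod t1 t2 t1.length
    rw [Nat.mod_self] at this
    exact this.symm
  cases hmx : PySem.List.max?
      ((List.range t1.length).map (fun j => (pvC t1 t2 (j+1) : Int))) (fun x => x) with
  | none =>
    exfalso
    rw [PySem.List.max?_eq_none_iff] at hmx
    have : t1.length = 0 := by simpa using congrArg List.length hmx
    omega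
  | some m =>
    exact pvMax_eq t1.length hn (pvC t1 t2) hper m hmx
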